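-- pv_equiv track=rewrite | github.com/nickmack823/Algo-Trading | scripts/multiprocessing_tester.py | count_valid_combos
-- ===== SOURCE A (Python) =====
-- from itertools import product
--
-- def count_valid_combos(vol_pool, base_pool, conf_pool, volu_pool, exit_pool):
--     total = 0
--     for atr, baseline, c1, c2, volume, exit in product(
--         vol_pool, base_pool, conf_pool, conf_pool, volu_pool, exit_pool
--     ):
--         if c1 != c2:
--             total += 1
--     return total
-- ===== SOURCE B (Python) =====
-- def count_valid_combos(vol_pool, base_pool, conf_pool, volu_pool, exit_pool):
--     n = len(conf_pool)
--     diff_pairs = sum(n - conf_pool.count(c) for c in conf_pool)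
--     return len(vol_pool) * len(base_pool) * diff_pairs * len(volu_pool) * len(exit_pool)
-- ===== Notes on version B (the rewrite author's own statement) =====
-- stated objective: faster
-- what changed: Replaces the six-fold Cartesian-product loop by a closed form: the number of unequal (c1,c2) pairs is computed from element counts in conf_pool alone and multiplied by the sizes of the other four pools.
import Mathlib
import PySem

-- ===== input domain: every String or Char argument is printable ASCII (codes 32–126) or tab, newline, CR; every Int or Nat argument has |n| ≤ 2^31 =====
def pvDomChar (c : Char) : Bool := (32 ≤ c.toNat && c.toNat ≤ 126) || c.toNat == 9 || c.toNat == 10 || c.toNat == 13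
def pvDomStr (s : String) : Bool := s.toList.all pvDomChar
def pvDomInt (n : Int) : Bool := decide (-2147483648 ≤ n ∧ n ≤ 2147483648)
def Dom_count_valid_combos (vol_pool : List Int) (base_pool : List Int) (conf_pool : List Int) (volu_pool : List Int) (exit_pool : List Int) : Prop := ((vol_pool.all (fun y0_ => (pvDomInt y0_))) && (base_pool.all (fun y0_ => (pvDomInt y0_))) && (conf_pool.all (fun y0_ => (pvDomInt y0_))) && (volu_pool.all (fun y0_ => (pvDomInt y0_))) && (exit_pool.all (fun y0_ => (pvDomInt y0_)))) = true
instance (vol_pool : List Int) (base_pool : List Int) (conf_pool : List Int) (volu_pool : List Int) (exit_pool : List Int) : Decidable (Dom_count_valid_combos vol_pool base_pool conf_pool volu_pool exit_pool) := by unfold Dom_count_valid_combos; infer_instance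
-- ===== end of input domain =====

-- B replaces the six-deep Cartesian-product loop (A) by a closed form: the number of
-- unequal (c1, c2) pairs computed from element counts of conf_pool, multiplied by the
-- lengths of the other four pools (objective: faster, asymptotically).

-- ===== PORT A =====
-- itertools.product over the six pools, counting tuples with c1 != c2, as nested folds
def count_valid_combos (vol_pool : List Int) (base_pool : List Int) (conf_pool : List Int) (volu_pool : List Int) (exit_pool : List Int) : Int :=
  vol_pool.foldl (fun total _atr =>
    base_pool.foldl (fun total _baseline =>
      conf_pool.foldl (fun total c1 =>
        conf_pool.foldl (fun total c2 =>
          volu_pool.foldl (fun total _volume =>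
            exit_pool.foldl (fun total _exit =>
              if c1 ≠ c2 then total + 1 else total) total) total) total) total) total) 0

-- ===== PORT B =====
def count_valid_combos_alt (vol_pool : List Int) (base_pool : List Int) (conf_pool : List Int) (volu_pool : List Int) (exit_pool : List Int) : Int :=
  let n : Int := conf_pool.length
  let diff_pairs : Int := conf_pool.foldl (fun s c => s + (n - PySem.List.count conf_pool c)) 0
  (vol_pool.length : Int) * base_pool.length * diff_pairs * volu_pool.length * exit_pool.length

-- ===== PRECONDITION & SPEC =====
def Spec_count_valid_combos (vol_pool : List Int) (base_pool : List Int) (conf_pool : List Int) (volu_pool : List Int) (exit_pool : List Int) (out : Int) : Prop := out = count_valid_combos_alt vol_pool base_pool conf_pool volu_pool exit_pool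
instance (vol_pool : List Int) (base_pool : List Int) (conf_pool : List Int) (volu_pool : List Int) (exit_pool : List Int) (out : Int) : Decidable (Spec_count_valid_combos vol_pool base_pool conf_pool volu_pool exit_pool out) := by unfold Spec_count_valid_combos; infer_instance

-- ===== CLAIM (what is proved, stated in full; the proofs are below) =====
def Claim_equal_count_valid_combos : Prop := ∀ (vol_pool : List Int) (base_pool : List Int) (conf_pool : List Int) (volu_pool : List Int) (exit_pool : List Int), Dom_count_valid_combos vol_pool base_pool conf_pool volu_pool exit_pool → Spec_count_valid_combos vol_pool base_pool conf_pool volu_pool exit_pool (count_valid_combos vol_pool base_pool conf_pool volu_pool exit_pool)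

-- ===== LEMMAS AND PROOFS =====

-- a foldl whose step adds g x to the accumulator is t plus the sum of g over the list
theorem pv_foldl_lift {α : Type} (l : List α) (f : Int → α → Int) (g : α → Int)
    (h : ∀ t x, f t x = t + g x) : ∀ t : Int, l.foldl f t = t + (l.map g).sum := by
  induction l with
  | nil => intro t; simp
  | cons y ys ih => intro t; simp only [List.foldl_cons, List.map_cons, List.sum_cons, h, ih]; ring

theorem pv_sum_const {α : Type} (l : List α) (k : Int) :
    (l.map (fun _ => k)).sum = (l.length : Int) * k := by
  induction l with
  | nil => simp
  | cons y ys ih => simp only [List.map_cons, List.sum_cons, List.length_cons, ih]; push_cast; ring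

theorem pv_sum_mul_left {α : Type} (l : List α) (k : Int) (g : α → Int) :
    (l.map (fun x => k * g x)).sum = k * (l.map g).sum := by
  induction l with
  | nil => simp
  | cons y ys ih => simp only [List.map_cons, List.sum_cons, ih]; ring

-- number of elements of c different from x
theorem pv_sum_ne (c : List Int) (x : Int) :
    (c.map (fun y => if x ≠ y then (1 : Int) else 0)).sum = (c.length : Int) - (c.count x : Int) := by
  induction c with
  | nil => simp
  | cons y ys ih =>
    rw [List.map_cons, List.sum_cons, ih, List.count_cons, List.length_cons]
    by_cases hxy : x = y
    · rw [if_neg (by simp [hxy]), if_pos (by simp [hxy])]; push_cast; ring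
    · rw [if_pos hxy, if_neg (by simp; exact fun h => hxy h.symm)]; push_cast; ring

-- ===== VERDICT (by name: the statement is the Claim_ definition above) =====
theorem count_valid_combos_spec : Claim_equal_count_valid_combos := by
  intro v b c u e _dom
  unfold Spec_count_valid_combos count_valid_combos count_valid_combos_alt
  have hE : ∀ (c1 c2 : Int) (t : Int),
      e.foldl (fun total _ => if c1 ≠ c2 then total + 1 else total) t
        = t + (e.length : Int) * (if c1 ≠ c2 then 1 else 0) := by
    intro c1 c2 t
    rw [pv_foldl_lift e _ (fun _ => if c1 ≠ c2 then (1 : Int) else 0)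
      (by intro t x; split_ifs <;> ring), pv_sum_const]
  have hU : ∀ (c1 c2 : Int) (t : Int),
      u.foldl (fun total _ => e.foldl (fun total _ => if c1 ≠ c2 then total + 1 else total) total) t
        = t + (u.length : Int) * (e.length : Int) * (if c1 ≠ c2 then 1 else 0) := by
    intro c1 c2 t
    rw [pv_foldl_lift u _ (fun _ => (e.length : Int) * (if c1 ≠ c2 then 1 else 0))
      (fun t _ => hE c1 c2 t), pv_sum_const]
    ring
  have hC2 : ∀ (c1 : Int) (t : Int),
      c.foldl (fun total c2 =>
        u.foldl (fun total _ => e.foldl (fun total _ => if c1 ≠ c2 then total + 1 else total) total) total) t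
        = t + (u.length : Int) * (e.length : Int) * ((c.length : Int) - (c.count c1 : Int)) := by
    intro c1 t
    rw [pv_foldl_lift c _ (fun c2 => (u.length : Int) * (e.length : Int) * (if c1 ≠ c2 then 1 else 0))
      (fun t c2 => hU c1 c2 t), pv_sum_mul_left, pv_sum_ne]
  have hC1 : ∀ t : Int,
      c.foldl (fun total c1 => c.foldl (fun total c2 =>
        u.foldl (fun total _ => e.foldl (fun total _ => if c1 ≠ c2 then total + 1 else total) total) total) total) t
        = t + (u.length : Int) * (e.length : Int)
            * (c.map (fun c1 => (c.length : Int) - (c.count c1 : Int))).sum := by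
    intro t
    rw [pv_foldl_lift c _ (fun c1 => (u.length : Int) * (e.length : Int) * ((c.length : Int) - (c.count c1 : Int)))
      (fun t c1 => hC2 c1 t), pv_sum_mul_left]
  have hB : ∀ t : Int, b.foldl (fun total _ => c.foldl (fun total c1 => c.foldl (fun total c2 =>
        u.foldl (fun total _ => e.foldl (fun total _ => if c1 ≠ c2 then total + 1 else total) total) total) total) total) t
        = t + (b.length : Int) * ((u.length : Int) * (e.length : Int)
            * (c.map (fun c1 => (c.length : Int) - (c.count c1 : Int))).sum) := by
    intro t
    rw [pv_foldl_lift b _ _ (fun t _ => hC1 t), pv_sum_const]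
  rw [pv_foldl_lift v _ (fun _ => (b.length : Int) * ((u.length : Int) * (e.length : Int)
        * (c.map (fun c1 => (c.length : Int) - (c.count c1 : Int))).sum)) (fun t _ => hB t), pv_sum_const]
  have hBfold : c.foldl (fun s c1 => s + ((c.length : Int) - PySem.List.count c c1)) 0
      = (c.map (fun c1 => (c.length : Int) - (c.count c1 : Int))).sum := by
    rw [pv_foldl_lift c _ (fun c1 => (c.length : Int) - (c.count c1 : Int))
      (by intro t x; rw [PySem.List.count_eq])]
    ring
  simp only [hBfold]
  ring
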